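-- pv_equiv track=rewrite | github.com/981377660LMT/algorithm-study | 19_数学/卷积/template/gcdConvove/gcdConvove.py | gcd_convolve
-- ===== SOURCE A (Python) =====
-- from typing import List
--
-- MOD = 998244353
--
-- def gcd_convolve(a: List[int], b: List[int]) -> List[int]:
--     add = lambda x, y: (x + y) % MOD
--     inv = lambda x: -x
--     mul = lambda x, y: (x * y) % MOD
--
--     a, b = [0] + a, [0] + b
--     a = multiple_zeta_transform(a, add)
--     b = multiple_zeta_transform(b, add)
--     res = [mul(v1, v2) for v1, v2 in zip(a, b)]
--     res = multiple_mobius_transform(res, add, inv)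
--     return res[1:]
--
-- def multiple_zeta_transform(a, op):
--     n = len(a)
--     res = a[:]
--     prime_table = [1] * n
--     for p in range(2, n):
--         if not prime_table[p]:
--             continue
--         i = (n - 1) // p
--         while i > 0:
--             res[i] = op(res[i], res[i * p])
--             prime_table[i * p] = 0
--             i -= 1
--     return res
--
-- def multiple_mobius_transform(a, op, inv):
--     n = len(a)
--     res = a[:]
--     prime_table = [1] * n
--     for p in range(2, n):
--         if not prime_table[p]:
--             continue
--         i = 1
--         while i * p < n:
--             res[i] = op(res[i], inv(res[i * p]))
--             prime_table[i * p] = 0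
--             i += 1
--     return res
-- ===== SOURCE B (Python) =====
-- MOD = 998244353
--
-- def gcd_convolve(a, b):
--     n = min(len(a), len(b))
--     res = [0] * (n + 1)
--     for i in range(1, len(a) + 1):
--         ai = a[i - 1]
--         for j in range(1, len(b) + 1):
--             x, y = i, j
--             while y:
--                 x, y = y, x % y
--             res[x] = (res[x] + ai * b[j - 1]) % MOD
--     return res[1:]
-- ===== Notes on version B (the rewrite author's own statement) =====
-- stated objective: simpler
-- what changed: Replaces the zeta-transform / Moebius-transform pipeline with the direct definition of gcd convolution: one double loop over all index pairs accumulating a[i-1]*b[j-1] into res[gcd(i,j)] mod 998244353; no prime sieve and no transforms.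
import Mathlib
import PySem

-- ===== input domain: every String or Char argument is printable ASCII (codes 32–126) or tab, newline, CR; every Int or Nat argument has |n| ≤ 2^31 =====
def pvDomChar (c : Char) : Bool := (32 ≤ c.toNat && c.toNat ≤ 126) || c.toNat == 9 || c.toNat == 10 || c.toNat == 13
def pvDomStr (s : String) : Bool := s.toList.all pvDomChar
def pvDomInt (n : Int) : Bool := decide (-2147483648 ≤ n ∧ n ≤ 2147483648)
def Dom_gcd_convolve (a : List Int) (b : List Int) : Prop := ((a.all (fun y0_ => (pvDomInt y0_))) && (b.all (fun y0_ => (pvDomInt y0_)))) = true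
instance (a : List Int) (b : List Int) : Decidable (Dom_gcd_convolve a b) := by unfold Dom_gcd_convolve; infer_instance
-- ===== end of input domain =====

-- B replaces A's zeta/Moebius-transform pipeline by the direct double-loop definition of
-- gcd convolution (simpler, no sieve/transforms); return values proved equal on all inputs.

-- ===== PORT A =====
def MODA : Int := 998244353

-- inner `while i > 0` loop of multiple_zeta_transform (i descending); list indices are in range
-- at every use (i ≤ (n-1)//p so i*p ≤ n-1), so getD/set are exact ports of res[i], res[i*p].
def zInner (p : Nat) : (List Int × List Int) → Nat → (List Int × List Int)
  | st, 0 => st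
  | st, (i+1) =>
      let res := st.1.set (i+1) (PySem.Int.mod (st.1.getD (i+1) 0 + st.1.getD ((i+1)*p) 0) MODA)
      let tab := st.2.set ((i+1)*p) 0
      zInner p (res, tab) i

-- one iteration of `for p in range(2, n)` in multiple_zeta_transform (entries of prime_table are
-- only ever 0 or 1, so `not prime_table[p]` is exactly the test `prime_table[p] == 0`)
def zStep (n : Nat) (st : List Int × List Int) (p : Nat) : List Int × List Int :=
  if st.2.getD p 0 = 0 then st else zInner p st ((n-1)/p)

def mzt (l : List Int) : List Int :=
  let n := l.length
  ((List.range' 2 (n-2)).foldl (zStep n) (l, List.replicate n (1:Int))).1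

-- inner `while i * p < n` loop of multiple_mobius_transform (i ascending); fuel ≥ n makes the
-- recursion structural, and suffices since the loop runs at most (n-1)/p < n times.
def mInner (p n : Nat) : (List Int × List Int) → Nat → Nat → (List Int × List Int)
  | st, _, 0 => st
  | st, i, (fuel+1) =>
      if i*p < n then
        let res := st.1.set i (PySem.Int.mod (st.1.getD i 0 + -(st.1.getD (i*p) 0)) MODA)
        let tab := st.2.set (i*p) 0
        mInner p n (res, tab) (i+1) fuel
      else st

def mStep (n : Nat) (st : List Int × List Int) (p : Nat) : List Int × List Int :=
  if st.2.getD p 0 = 0 then st else mInner p n st 1 n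

def mmt (l : List Int) : List Int :=
  let n := l.length
  ((List.range' 2 (n-2)).foldl (mStep n) (l, List.replicate n (1:Int))).1

def gcd_convolve (a : List Int) (b : List Int) : List Int :=
  let a' := mzt (0 :: a)
  let b' := mzt (0 :: b)
  let res := (a'.zip b').map (fun v => PySem.Int.mod (v.1 * v.2) MODA)
  (mmt res).drop 1

-- ===== PORT B =====
-- the hand-written Euclid loop `while y: x, y = y, x % y` of Source B
def mygcd (x y : Nat) : Nat :=
  if h : y = 0 then x else mygcd y (x % y)
termination_by y
decreasing_by exact Nat.mod_lt x (Nat.pos_of_ne_zero h)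

def gcd_convolve_alt (a : List Int) (b : List Int) : List Int :=
  let n := min a.length b.length
  let res0 := List.replicate (n+1) (0:Int)
  let res := (List.range' 1 a.length).foldl (fun r i =>
      let ai := a.getD (i-1) 0
      (List.range' 1 b.length).foldl (fun r j =>
          let g := mygcd i j
          r.set g (PySem.Int.mod (r.getD g 0 + ai * b.getD (j-1) 0) MODA)) r) res0
  res.drop 1

-- ===== PRECONDITION & SPEC =====
def Spec_gcd_convolve (a : List Int) (b : List Int) (out : List Int) : Prop := out = gcd_convolve_alt a b
instance (a : List Int) (b : List Int) (out : List Int) : Decidable (Spec_gcd_convolve a b out) := by unfold Spec_gcd_convolve; infer_instance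

-- ===== CLAIM (what is proved, stated in full; the proofs are below) =====
def Claim_equal_gcd_convolve : Prop := ∀ (a : List Int) (b : List Int), Dom_gcd_convolve a b → Spec_gcd_convolve a b (gcd_convolve a b)

-- ===== LEMMAS AND PROOFS =====

-- ===== proof infrastructure =====
-- residues mod 998244353; all list contents are compared through their casts plus range facts
abbrev Rm : Type := ZMod 998244353

def lft (l : List Int) (j : Nat) : Rm := ((l.getD j 0 : Int) : Rm)

lemma pymod_eq (x : Int) : PySem.Int.mod x MODA = x % 998244353 := by
  rw [show MODA = (998244353:Int) from rfl, PySem.Int.mod_eq_emod_of_pos (by norm_num)]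

lemma pymod_nonneg (x : Int) : 0 ≤ PySem.Int.mod x MODA := by
  rw [pymod_eq]; exact Int.emod_nonneg x (by norm_num)
lemma pymod_lt (x : Int) : PySem.Int.mod x MODA < 998244353 := by
  rw [pymod_eq]; exact Int.emod_lt_of_pos x (by norm_num)

lemma cast_pymod (x : Int) : ((PySem.Int.mod x MODA : Int) : Rm) = (x : Rm) := by
  rw [pymod_eq]
  refine (ZMod.intCast_eq_intCast_iff _ _ _).mpr ?_
  show (x % 998244353) % ((998244353:Nat):Int) = x % ((998244353:Nat):Int)
  push_cast
  exact Int.emod_emod_of_dvd x dvd_rfl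

lemma int_eq_of_cast {x y : Int} (hx0 : 0 ≤ x) (hx1 : x < 998244353)
    (hy0 : 0 ≤ y) (hy1 : y < 998244353) (h : (x : Rm) = (y : Rm)) : x = y := by
  have h1 := (ZMod.intCast_eq_intCast_iff x y 998244353).mp h
  have h2 : x % ((998244353:Nat):Int) = y % ((998244353:Nat):Int) := h1
  push_cast at h2
  omega

lemma getD_set_self (l : List Int) (i : Nat) (x : Int) (h : i < l.length) :
    (l.set i x).getD i 0 = x := by
  simp [List.getD_eq_getElem?_getD, List.getElem?_set, h]

lemma getD_set_ne (l : List Int) {i j : Nat} (x : Int) (h : i ≠ j) :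
    (l.set i x).getD j 0 = l.getD j 0 := by
  simp [List.getD_eq_getElem?_getD, List.getElem?_set, h]

lemma getD_out {l : List Int} {j : Nat} (h : l.length ≤ j) : l.getD j 0 = 0 := by
  simp [List.getD_eq_getElem?_getD, List.getElem?_eq_none h]

lemma lft_out {l : List Int} {j : Nat} (h : l.length ≤ j) : lft l j = 0 := by
  unfold lft; rw [getD_out h]; simp

-- ===== the three arithmetic sums =====
-- divisor sum: ∑ over the multiples j*e < n (e ≥ 1) of f
def DSf (n : Nat) (f : Nat → Rm) (j : Nat) : Rm :=
  ∑ e ∈ Finset.range n, if 1 ≤ e ∧ j*e < n then f (j*e) else 0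
-- partial zeta: only multipliers e all of whose prime factors are < B
def SSf (B n : Nat) (f : Nat → Rm) (j : Nat) : Rm :=
  ∑ e ∈ Finset.range n, if 1 ≤ e ∧ j*e < n ∧ ∀ q ∈ e.primeFactors, q < B then f (j*e) else 0
-- partial Moebius: only multipliers e all of whose prime factors are ≥ B
def RSf (B n : Nat) (f : Nat → Rm) (j : Nat) : Rm :=
  ∑ e ∈ Finset.range n, if 1 ≤ e ∧ j*e < n ∧ ∀ q ∈ e.primeFactors, B ≤ q then f (j*e) else 0

lemma DSf_vanish {n j : Nat} (f : Nat → Rm) (h : n ≤ j) : DSf n f j = 0 := by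
  refine Finset.sum_eq_zero fun e _ => ?_
  split_ifs with hc
  · exfalso; have := Nat.le_mul_of_pos_right j hc.1; omega
  · rfl
lemma SSf_vanish {B n j : Nat} (f : Nat → Rm) (h : n ≤ j) : SSf B n f j = 0 := by
  refine Finset.sum_eq_zero fun e _ => ?_
  split_ifs with hc
  · exfalso; have := Nat.le_mul_of_pos_right j hc.1; omega
  · rfl

lemma sum_ite_eq_point {n v : Nat} {Q : Prop} [Decidable Q] (x : Rm) :
    (∑ d ∈ Finset.range n, if d = v ∧ Q then x else 0) = if v < n ∧ Q then x else 0 := by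
  by_cases hQ : Q
  · simp only [hQ, and_true]
    rw [Finset.sum_ite_eq' (Finset.range n) v (fun _ => x)]
    simp
  · simp [hQ]

lemma sum_single_one {n j : Nat} (hj : 1 ≤ j) (P : Nat → Prop) [DecidablePred P] (hP1 : P 1)
    (hP : ∀ e, 2 ≤ e → e < n → ¬ P e) (f : Nat → Rm) :
    (∑ e ∈ Finset.range n, if 1 ≤ e ∧ j*e < n ∧ P e then f (j*e) else 0)
      = if j < n then f j else 0 := by
  rw [Finset.sum_eq_single 1]
  · simp [hP1, Nat.mul_one]
  · intro e he hne
    split_ifs with hc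
    · exact absurd hc.2.2 (hP e (by omega) (Finset.mem_range.mp he))
    · rfl
  · intro h1
    split_ifs with hc
    · exfalso; have := Finset.mem_range.not.mp h1; omega
    · rfl

lemma ite_sum {C : Prop} [Decidable C] {s : Finset Nat} (g : Nat → Rm) :
    (if C then (∑ e ∈ s, g e) else 0) = ∑ e ∈ s, if C then g e else 0 := by
  split_ifs with h
  · rfl
  · simp

lemma ite_ite {C D : Prop} [Decidable C] [Decidable D] (x : Rm) :
    (if C then (if D then x else 0) else 0) = if C ∧ D then x else 0 := by
  by_cases hC : C <;> by_cases hD : D <;> simp [hC, hD]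

lemma pv_ite_mul {C D : Prop} [Decidable C] [Decidable D] (x y : Rm) :
    (if C then x else 0) * (if D then y else 0) = if C ∧ D then x*y else 0 := by
  by_cases hC : C <;> by_cases hD : D <;> simp [hC, hD]

lemma DSf_div {m k : Nat} (hk : 1 ≤ k) (f : Nat → Rm) :
    DSf m f k = ∑ i ∈ Finset.range m, if k ∣ i ∧ 1 ≤ i then f i else 0 := by
  unfold DSf
  rw [← Finset.sum_filter (fun e => 1 ≤ e ∧ k*e < m) (fun e => f (k*e)),
      ← Finset.sum_filter (fun i => k ∣ i ∧ 1 ≤ i) (fun i => f i)]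
  refine Finset.sum_bij' (fun e _ => k*e) (fun i _ => i/k) ?_ ?_ ?_ ?_ ?_
  · intro e he
    simp only [Finset.mem_filter, Finset.mem_range] at he ⊢
    exact ⟨he.2.2, dvd_mul_right k e, Nat.mul_pos (by omega) he.2.1⟩
  · intro i hi
    simp only [Finset.mem_filter, Finset.mem_range] at hi ⊢
    obtain ⟨hm, hdv, h1⟩ := hi
    have hc : k * (i/k) = i := Nat.mul_div_cancel' hdv
    have hle : i/k ≤ i := Nat.div_le_self i k
    exact ⟨by omega, Nat.div_pos (Nat.le_of_dvd (by omega) hdv) (by omega), by omega⟩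
  · intro e he
    exact Nat.mul_div_cancel_left e (by omega)
  · intro i hi
    simp only [Finset.mem_filter, Finset.mem_range] at hi
    exact Nat.mul_div_cancel' hi.2.1
  · intro e he
    rfl

lemma sum_split {n j p : Nat} (hj : 1 ≤ j) (hp : 1 ≤ p)
    (A A1 A2 : Nat → Prop) [DecidablePred A] [DecidablePred A1] [DecidablePred A2]
    (hA : ∀ e, 1 ≤ e → (A e ↔ (A1 e ∧ ¬ p ∣ e) ∨ (p ∣ e ∧ A2 (e/p))))
    (hA1 : ∀ e, 1 ≤ e → A1 e → ¬ p ∣ e)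
    (f : Nat → Rm) :
    (∑ e ∈ Finset.range n, if 1 ≤ e ∧ j*e < n ∧ A e then f (j*e) else 0)
  = (∑ e ∈ Finset.range n, if 1 ≤ e ∧ j*e < n ∧ A1 e then f (j*e) else 0)
  + (∑ e ∈ Finset.range n, if 1 ≤ e ∧ j*p*e < n ∧ A2 e then f (j*p*e) else 0) := by
  have step : ∀ e ∈ Finset.range n, (if 1 ≤ e ∧ j*e < n ∧ A e then f (j*e) else 0)
      = (if 1 ≤ e ∧ j*e < n ∧ A1 e then f (j*e) else 0)
      + (if 1 ≤ e ∧ j*e < n ∧ p ∣ e ∧ A2 (e/p) then f (j*e) else 0) := by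
    intro e _
    by_cases he : 1 ≤ e
    · by_cases hd : p ∣ e
      · have hna1 : ¬ A1 e := fun h => hA1 e he h hd
        have hiff : A e ↔ A2 (e/p) := by rw [hA e he]; tauto
        by_cases h2 : A2 (e/p) <;> by_cases hc : j*e < n <;>
          simp [he, hd, h2, hc, hna1, hiff]
      · have hiff : A e ↔ A1 e := by rw [hA e he]; tauto
        by_cases h1 : A1 e <;> by_cases hc : j*e < n <;>
          simp [he, hd, h1, hc, hiff]
    · simp [he]
  rw [Finset.sum_congr rfl step, Finset.sum_add_distrib]
  congr 1
  rw [← Finset.sum_filter (fun e => 1 ≤ e ∧ j*e < n ∧ p ∣ e ∧ A2 (e/p)) (fun e => f (j*e)),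
      ← Finset.sum_filter (fun e => 1 ≤ e ∧ j*p*e < n ∧ A2 e) (fun e => f (j*p*e))]
  refine Finset.sum_bij' (fun e _ => e / p) (fun e _ => p * e) ?_ ?_ ?_ ?_ ?_
  · intro e he
    simp only [Finset.mem_filter, Finset.mem_range] at he ⊢
    obtain ⟨hr, h1, h2, hd, h3⟩ := he
    have hpe : p * (e/p) = e := Nat.mul_div_cancel' hd
    have hle : e/p ≤ e := Nat.div_le_self e p
    refine ⟨by omega, Nat.div_pos (Nat.le_of_dvd (by omega) hd) (by omega), ?_, h3⟩
    rw [mul_assoc, hpe]; exact h2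
  · intro e he
    simp only [Finset.mem_filter, Finset.mem_range] at he ⊢
    obtain ⟨hr, h1, h2, h3⟩ := he
    have hpos : 0 < p * e := Nat.mul_pos (by omega) h1
    have hle : p*e ≤ j*(p*e) := Nat.le_mul_of_pos_left _ hj
    rw [← mul_assoc] at hle
    refine ⟨by omega, by omega, ?_, ⟨Dvd.intro e rfl, ?_⟩⟩
    · rw [← mul_assoc]; exact h2
    · rw [Nat.mul_div_cancel_left e (by omega)]; exact h3
  · intro e he
    simp only [Finset.mem_filter, Finset.mem_range] at he
    exact Nat.mul_div_cancel' he.2.2.2.1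
  · intro e he
    exact Nat.mul_div_cancel_left e (by omega)
  · intro e he
    simp only [Finset.mem_filter, Finset.mem_range] at he
    rw [mul_assoc, Nat.mul_div_cancel' he.2.2.2.1]

lemma SSf_base {n j : Nat} (hj : 1 ≤ j) (f : Nat → Rm) :
    SSf 2 n f j = if j < n then f j else 0 := by
  refine sum_single_one hj _ (by simp) (fun e h2 _ hP => ?_) f
  obtain ⟨q, hq, hqd⟩ := Nat.exists_prime_and_dvd (show e ≠ 1 by omega)
  have hm : q ∈ e.primeFactors := Nat.mem_primeFactors.mpr ⟨hq, hqd, by omega⟩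
  have := hP q hm
  have := hq.two_le
  omega

lemma SSf_top {B n j : Nat} (hn : n ≤ B) (hj : 1 ≤ j) (f : Nat → Rm) :
    SSf B n f j = DSf n f j := by
  refine Finset.sum_congr rfl fun e _ => ?_
  refine if_congr ⟨fun h => ⟨h.1, h.2.1⟩, fun h => ⟨h.1, h.2, fun q hq => ?_⟩⟩ rfl rfl
  have h1 : q ≤ e := Nat.le_of_dvd (by omega) (Nat.dvd_of_mem_primeFactors hq)
  have h2 : e ≤ j*e := Nat.le_mul_of_pos_left e hj
  omega

lemma RSf_base {n j : Nat} (f : Nat → Rm) : RSf 2 n f j = DSf n f j := by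
  refine Finset.sum_congr rfl fun e _ => ?_
  refine if_congr ⟨fun h => ⟨h.1, h.2.1⟩,
    fun h => ⟨h.1, h.2, fun q hq => (Nat.prime_of_mem_primeFactors hq).two_le⟩⟩ rfl rfl

lemma RSf_top {B n j : Nat} (hn : n ≤ B) (hj : 1 ≤ j) (f : Nat → Rm) :
    RSf B n f j = if j < n then f j else 0 := by
  refine sum_single_one hj _ (by simp) (fun e h2 hen hP => ?_) f
  obtain ⟨q, hq, hqd⟩ := Nat.exists_prime_and_dvd (show e ≠ 1 by omega)
  have hm : q ∈ e.primeFactors := Nat.mem_primeFactors.mpr ⟨hq, hqd, by omega⟩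
  have h3 := hP q hm
  have h4 : q ≤ e := Nat.le_of_dvd (by omega) hqd
  omega

lemma SSf_succ_not_prime {p n j : Nat} (hp : ¬ p.Prime) (f : Nat → Rm) :
    SSf (p+1) n f j = SSf p n f j := by
  refine Finset.sum_congr rfl fun e _ => ?_
  refine if_congr (and_congr_right fun _ => and_congr_right fun _ =>
    forall₂_congr fun q hq => ?_) rfl rfl
  have : q ≠ p := fun h => hp (h ▸ Nat.prime_of_mem_primeFactors hq)
  omega

lemma RSf_succ_not_prime {p n j : Nat} (hp : ¬ p.Prime) (f : Nat → Rm) :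
    RSf (p+1) n f j = RSf p n f j := by
  refine Finset.sum_congr rfl fun e _ => ?_
  refine if_congr (and_congr_right fun _ => and_congr_right fun _ =>
    forall₂_congr fun q hq => ?_) rfl rfl
  have : q ≠ p := fun h => hp (h ▸ Nat.prime_of_mem_primeFactors hq)
  omega

lemma SSf_succ_prime {p n j : Nat} (hp : p.Prime) (hj : 1 ≤ j) (f : Nat → Rm) :
    SSf (p+1) n f j = SSf p n f j + SSf (p+1) n f (j*p) := by
  have hp2 := hp.two_le
  have hA : ∀ e, 1 ≤ e → ((∀ q ∈ e.primeFactors, q < p+1) ↔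
      ((∀ q ∈ e.primeFactors, q < p) ∧ ¬ p ∣ e) ∨ (p ∣ e ∧ ∀ q ∈ (e/p).primeFactors, q < p+1)) := by
    intro e he
    constructor
    · intro h
      by_cases hd : p ∣ e
      · exact Or.inr ⟨hd, fun q hq =>
          h q (Nat.primeFactors_mono (Nat.div_dvd_of_dvd hd) (by omega) hq)⟩
      · refine Or.inl ⟨fun q hq => ?_, hd⟩
        have h1 := h q hq
        have : q ≠ p := by rintro rfl; exact hd (Nat.dvd_of_mem_primeFactors hq)
        omega
    · rintro (⟨h1, _⟩ | ⟨hd, h2⟩) q hq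
      · have := h1 q hq; omega
      · have hqp := Nat.prime_of_mem_primeFactors hq
        have hqd := Nat.dvd_of_mem_primeFactors hq
        have hmul : q ∣ p * (e/p) := (Nat.mul_div_cancel' hd).symm ▸ hqd
        rcases (Nat.Prime.dvd_mul hqp).mp hmul with hq1 | hq2
        · have : q = p := (Nat.prime_dvd_prime_iff_eq hqp hp).mp hq1
          omega
        · have hpos : 0 < e / p := Nat.div_pos (Nat.le_of_dvd (by omega) hd) hp.pos
          exact h2 q (Nat.mem_primeFactors.mpr ⟨hqp, hq2, by omega⟩)
  have hA1 : ∀ e, 1 ≤ e → (∀ q ∈ e.primeFactors, q < p) → ¬ p ∣ e := by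
    intro e he h1 hd
    have := h1 p (Nat.mem_primeFactors.mpr ⟨hp, hd, by omega⟩)
    omega
  unfold SSf
  exact sum_split hj (by omega) _ _ _ hA hA1 f

lemma RSf_succ_prime {p n j : Nat} (hp : p.Prime) (hj : 1 ≤ j) (f : Nat → Rm) :
    RSf p n f j = RSf (p+1) n f j + RSf p n f (j*p) := by
  have hp2 := hp.two_le
  have hA : ∀ e, 1 ≤ e → ((∀ q ∈ e.primeFactors, p ≤ q) ↔
      ((∀ q ∈ e.primeFactors, p+1 ≤ q) ∧ ¬ p ∣ e) ∨ (p ∣ e ∧ ∀ q ∈ (e/p).primeFactors, p ≤ q)) := by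
    intro e he
    constructor
    · intro h
      by_cases hd : p ∣ e
      · exact Or.inr ⟨hd, fun q hq =>
          h q (Nat.primeFactors_mono (Nat.div_dvd_of_dvd hd) (by omega) hq)⟩
      · refine Or.inl ⟨fun q hq => ?_, hd⟩
        have h1 := h q hq
        have : q ≠ p := by rintro rfl; exact hd (Nat.dvd_of_mem_primeFactors hq)
        omega
    · rintro (⟨h1, _⟩ | ⟨hd, h2⟩) q hq
      · have := h1 q hq; omega
      · have hqp := Nat.prime_of_mem_primeFactors hq
        have hqd := Nat.dvd_of_mem_primeFactors hq
        have hmul : q ∣ p * (e/p) := (Nat.mul_div_cancel' hd).symm ▸ hqd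
        rcases (Nat.Prime.dvd_mul hqp).mp hmul with hq1 | hq2
        · have : q = p := (Nat.prime_dvd_prime_iff_eq hqp hp).mp hq1
          omega
        · have hpos : 0 < e / p := Nat.div_pos (Nat.le_of_dvd (by omega) hd) hp.pos
          exact h2 q (Nat.mem_primeFactors.mpr ⟨hqp, hq2, by omega⟩)
  have hA1 : ∀ e, 1 ≤ e → (∀ q ∈ e.primeFactors, p+1 ≤ q) → ¬ p ∣ e := by
    intro e he h1 hd
    have := h1 p (Nat.mem_primeFactors.mpr ⟨hp, hd, by omega⟩)
    omega
  unfold RSf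
  exact sum_split hj (by omega) _ _ _ hA hA1 f

-- the gcd-convolution array, as a function of the output index (index 0-padded inputs)
def gcdc (a b : List Int) (d : Nat) : Rm :=
  ∑ i ∈ Finset.range (a.length+1), ∑ j ∈ Finset.range (b.length+1),
    if Nat.gcd i j = d then lft (0 :: a) i * lft (0 :: b) j else 0

lemma prod_DS (a b : List Int) (k : Nat) (hk : 1 ≤ k) :
    DSf (a.length+1) (lft (0 :: a)) k * DSf (b.length+1) (lft (0 :: b)) k
      = DSf (min (a.length+1) (b.length+1)) (gcdc a b) k := by
  set n := min (a.length+1) (b.length+1) with hn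
  rw [DSf_div hk, DSf_div hk, Finset.sum_mul_sum]
  have key : ∀ i ∈ Finset.range (a.length+1), ∀ j ∈ Finset.range (b.length+1),
      (if k ∣ i ∧ 1 ≤ i then lft (0 :: a) i else 0) * (if k ∣ j ∧ 1 ≤ j then lft (0 :: b) j else 0)
      = ∑ d ∈ Finset.range n,
          if (1 ≤ d ∧ k*d < n) ∧ Nat.gcd i j = k*d then lft (0 :: a) i * lft (0 :: b) j else 0 := by
    intro i hi j hj
    have heval : (∑ d ∈ Finset.range n,
          if (1 ≤ d ∧ k*d < n) ∧ Nat.gcd i j = k*d then lft (0 :: a) i * lft (0 :: b) j else 0)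
        = if k ∣ Nat.gcd i j ∧ k ≤ Nat.gcd i j ∧ Nat.gcd i j < n
          then lft (0 :: a) i * lft (0 :: b) j else 0 := by
      have hcond : ∀ d, ((1 ≤ d ∧ k*d < n) ∧ Nat.gcd i j = k*d)
          ↔ (d = Nat.gcd i j / k ∧ (k ∣ Nat.gcd i j ∧ k ≤ Nat.gcd i j ∧ Nat.gcd i j < n)) := by
        intro d
        constructor
        · rintro ⟨⟨h1, h2⟩, h3⟩
          refine ⟨by rw [h3, Nat.mul_div_cancel_left d (by omega)], h3 ▸ dvd_mul_right k d,
            h3 ▸ Nat.le_mul_of_pos_right k h1, h3 ▸ h2⟩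
        · rintro ⟨hd0, hdv, hke, hlt⟩
          subst hd0
          have hg : k * (Nat.gcd i j / k) = Nat.gcd i j := Nat.mul_div_cancel' hdv
          refine ⟨⟨Nat.div_pos hke (by omega), by rw [hg]; exact hlt⟩, hg.symm⟩
      rw [Finset.sum_congr rfl fun d _ => if_congr (hcond d) rfl rfl, sum_ite_eq_point]
      refine if_congr ⟨fun h => h.2, fun h => ⟨?_, h⟩⟩ rfl rfl
      have := Nat.div_le_self (Nat.gcd i j) k
      omega
    rw [heval, pv_ite_mul]
    by_cases hi0 : i = 0
    · subst hi0
      have hz : lft ((0:Int) :: a) 0 = 0 := by simp [lft]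
      rw [hz]
      simp
    · by_cases hj0 : j = 0
      · subst hj0
        have hz : lft ((0:Int) :: b) 0 = 0 := by simp [lft]
        rw [hz]
        simp
      · have hi1 : 1 ≤ i := by omega
        have hj1 : 1 ≤ j := by omega
        have hgpos : 0 < Nat.gcd i j := Nat.gcd_pos_of_pos_left j hi1
        refine if_congr ?_ rfl rfl
        constructor
        · rintro ⟨⟨hdi, _⟩, hdj, _⟩
          have hdg : k ∣ Nat.gcd i j := Nat.dvd_gcd_iff.mpr ⟨hdi, hdj⟩
          refine ⟨hdg, Nat.le_of_dvd hgpos hdg, ?_⟩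
          have h1 : Nat.gcd i j ≤ i := Nat.gcd_le_left j hi1
          have h2 : Nat.gcd i j ≤ j := Nat.gcd_le_right i hj1
          have h3 : i < a.length + 1 := Finset.mem_range.mp hi
          have h4 : j < b.length + 1 := Finset.mem_range.mp hj
          omega
        · rintro ⟨hdg, _, _⟩
          obtain ⟨hdi, hdj⟩ := Nat.dvd_gcd_iff.mp hdg
          exact ⟨⟨hdi, hi1⟩, hdj, hj1⟩
  refine Eq.trans (Finset.sum_congr rfl fun i hi => Finset.sum_congr rfl fun j hj => key i hi j hj) ?_
  have hR : (∑ d ∈ Finset.range n, if 1 ≤ d ∧ k*d < n then gcdc a b (k*d) else 0)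
      = ∑ i ∈ Finset.range (a.length+1), ∑ j ∈ Finset.range (b.length+1),
          ∑ d ∈ Finset.range n,
            if (1 ≤ d ∧ k*d < n) ∧ Nat.gcd i j = k*d then lft (0 :: a) i * lft (0 :: b) j else 0 := by
    have h1 : (∑ d ∈ Finset.range n, if 1 ≤ d ∧ k*d < n then gcdc a b (k*d) else 0)
        = ∑ d ∈ Finset.range n, ∑ i ∈ Finset.range (a.length+1), ∑ j ∈ Finset.range (b.length+1),
            if (1 ≤ d ∧ k*d < n) ∧ Nat.gcd i j = k*d then lft (0 :: a) i * lft (0 :: b) j else 0 := by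
      refine Finset.sum_congr rfl fun d _ => ?_
      rw [gcdc, ite_sum]
      refine Finset.sum_congr rfl fun i _ => ?_
      rw [ite_sum]
      refine Finset.sum_congr rfl fun j _ => ?_
      rw [ite_ite]
    rw [h1, Finset.sum_comm]
    exact Finset.sum_congr rfl fun i _ => Finset.sum_comm
  exact hR.symm

-- ===== characterization of the transform passes of port A =====

lemma zInner_len (p : Nat) : ∀ (k : Nat) (st : List Int × List Int),
    (zInner p st k).1.length = st.1.length ∧ (zInner p st k).2.length = st.2.length := by
  intro k
  induction k with
  | zero => intro st; exact ⟨rfl, rfl⟩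
  | succ k IH =>
    intro st
    simp only [zInner]
    have := IH (st.1.set (k+1) (PySem.Int.mod (st.1.getD (k+1) 0 + st.1.getD ((k+1)*p) 0) MODA),
      st.2.set ((k+1)*p) 0)
    simpa [List.length_set] using this

lemma zInner_res (p : Nat) (hp : 2 ≤ p) :
    ∀ (k : Nat) (res tab : List Int) (j : Nat), 1 ≤ j →
      lft (zInner p (res, tab) k).1 j
        = lft res j + (if j ≤ k then lft (zInner p (res, tab) k).1 (j*p) else 0) := by
  intro k
  induction k with
  | zero =>
    intro res tab j hj
    simp only [zInner]
    rw [if_neg (by omega), add_zero]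
  | succ k IH =>
    intro res tab j hj
    simp only [zInner]
    set v := PySem.Int.mod (res.getD (k+1) 0 + res.getD ((k+1)*p) 0) MODA with hv
    rcases Nat.lt_trichotomy j (k+1) with hlt | heq | hgt
    · have hk : j ≤ k := by omega
      have e1 : lft (res.set (k+1) v) j = lft res j := by
        unfold lft; rw [getD_set_ne res v (show k+1 ≠ j by omega)]
      rw [IH (res.set (k+1) v) (tab.set ((k+1)*p) 0) j hj, e1, if_pos hk,
        if_pos (show j ≤ k+1 by omega)]
    · subst heq
      have hmul : 2*(k+1) ≤ (k+1)*p := by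
        have := Nat.mul_le_mul (le_refl (k+1)) hp
        omega
      by_cases hlen : k+1 < res.length
      · have hres'j : lft (res.set (k+1) v) (k+1)
            = lft res (k+1) + lft res ((k+1)*p) := by
          unfold lft
          rw [getD_set_self res (k+1) v hlen, hv, cast_pymod]
          push_cast
          ring
        have hG : lft (zInner p (res.set (k+1) v, tab.set ((k+1)*p) 0) k).1 ((k+1)*p)
            = lft res ((k+1)*p) := by
          rw [IH (res.set (k+1) v) (tab.set ((k+1)*p) 0) ((k+1)*p) (by omega),
            if_neg (by omega), add_zero]
          unfold lft
          rw [getD_set_ne res v (show k+1 ≠ (k+1)*p by omega)]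
        rw [IH (res.set (k+1) v) (tab.set ((k+1)*p) 0) (k+1) (by omega),
          if_neg (show ¬ k+1 ≤ k by omega), add_zero, hres'j,
          if_pos (le_refl (k+1)), hG]
      · have hlen' : res.length ≤ k+1 := by omega
        have hre : res.set (k+1) v = res := List.set_eq_of_length_le hlen'
        rw [IH (res.set (k+1) v) (tab.set ((k+1)*p) 0) (k+1) (by omega),
          if_neg (show ¬ k+1 ≤ k by omega), add_zero, hre,
          if_pos (le_refl (k+1))]
        have hG0 : lft (zInner p (res, tab.set ((k+1)*p) 0) k).1 ((k+1)*p) = 0 := by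
          apply lft_out
          rw [(zInner_len p k (res, tab.set ((k+1)*p) 0)).1]
          show res.length ≤ (k+1)*p
          omega
        rw [hG0, add_zero]
    · have e1 : lft (res.set (k+1) v) j = lft res j := by
        unfold lft; rw [getD_set_ne res v (show k+1 ≠ j by omega)]
      rw [IH (res.set (k+1) v) (tab.set ((k+1)*p) 0) j hj,
        if_neg (show ¬ j ≤ k by omega), add_zero, e1,
        if_neg (show ¬ j ≤ k+1 by omega), add_zero]

lemma zInner_tab (p : Nat) (hp : 1 ≤ p) :
    ∀ (k : Nat) (res tab : List Int), k*p < tab.length →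
      (∀ j, (∃ i, 1 ≤ i ∧ i ≤ k ∧ j = i*p) → (zInner p (res, tab) k).2.getD j 0 = 0)
      ∧ (∀ j, (¬ ∃ i, 1 ≤ i ∧ i ≤ k ∧ j = i*p) → (zInner p (res, tab) k).2.getD j 0 = tab.getD j 0) := by
  intro k
  induction k with
  | zero =>
    intro res tab hlen
    constructor
    · rintro j ⟨i, hi1, hi0, _⟩; omega
    · intro j _; rfl
  | succ k IH =>
    intro res tab hlen
    simp only [zInner]
    have hmono : k*p ≤ (k+1)*p := Nat.mul_le_mul_right p (by omega)
    have hlen' : k*p < (tab.set ((k+1)*p) 0).length := by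
      rw [List.length_set]; omega
    obtain ⟨IHa, IHb⟩ := IH
      (res.set (k+1) (PySem.Int.mod (res.getD (k+1) 0 + res.getD ((k+1)*p) 0) MODA))
      (tab.set ((k+1)*p) 0) hlen'
    constructor
    · rintro j ⟨i, hi1, hik, rfl⟩
      by_cases hik' : i ≤ k
      · exact IHa (i*p) ⟨i, hi1, hik', rfl⟩
      · have hieq : i = k+1 := by omega
        subst hieq
        rw [IHb ((k+1)*p) ?_]
        · exact getD_set_self tab ((k+1)*p) 0 hlen
        · rintro ⟨i', hi'1, hi'k, heq⟩
          have : i' = k+1 := Nat.eq_of_mul_eq_mul_right (show 0 < p by omega) heq.symm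
          omega
    · intro j hj
      rw [IHb j ?_]
      · exact getD_set_ne tab 0 fun heq => hj ⟨k+1, by omega, le_refl _, heq.symm⟩
      · rintro ⟨i, hi1, hik, heq⟩
        exact hj ⟨i, hi1, by omega, heq⟩

lemma mInner_spec (p n : Nat) (hp : 2 ≤ p) :
    ∀ (fuel i : Nat) (res tab : List Int), 1 ≤ i → n ≤ i + fuel → res.length = n → tab.length = n →
      (mInner p n (res, tab) i fuel).1.length = n ∧ (mInner p n (res, tab) i fuel).2.length = n
      ∧ (∀ j, j < i → (mInner p n (res, tab) i fuel).1.getD j 0 = res.getD j 0)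
      ∧ (∀ j, i ≤ j → j*p < n → (mInner p n (res, tab) i fuel).1.getD j 0
            = PySem.Int.mod (res.getD j 0 + -(res.getD (j*p) 0)) MODA)
      ∧ (∀ j, i ≤ j → n ≤ j*p → (mInner p n (res, tab) i fuel).1.getD j 0 = res.getD j 0)
      ∧ (∀ j, (∃ m, i ≤ m ∧ m*p < n ∧ j = m*p) → (mInner p n (res, tab) i fuel).2.getD j 0 = 0)
      ∧ (∀ j, (¬ ∃ m, i ≤ m ∧ m*p < n ∧ j = m*p) → (mInner p n (res, tab) i fuel).2.getD j 0 = tab.getD j 0) := by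
  intro fuel
  induction fuel with
  | zero =>
    intro i res tab hi hn hres htab
    simp only [mInner]
    refine ⟨hres, htab, fun j _ => trivial, fun j hij hjp => ?_, fun j _ _ => trivial,
      fun j hex => ?_, fun j _ => trivial⟩
    · exfalso
      have h1 : j ≤ j*p := Nat.le_mul_of_pos_right j (by omega)
      omega
    · exfalso
      obtain ⟨m, him, hmp, _⟩ := hex
      have h1 : m ≤ m*p := Nat.le_mul_of_pos_right m (by omega)
      omega
  | succ fuel IH =>
    intro i res tab hi hn hres htab
    simp only [mInner]
    by_cases hc : i*p < n
    · rw [if_pos hc]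
      set v := PySem.Int.mod (res.getD i 0 + -(res.getD (i*p) 0)) MODA with hv
      have hres' : (res.set i v).length = n := by rw [List.length_set, hres]
      have htab' : (tab.set (i*p) 0).length = n := by rw [List.length_set, htab]
      have hilt : i < n := by
        have := Nat.le_mul_of_pos_right i (show 0 < p by omega)
        omega
      obtain ⟨L1, L2, B1, C1, D1, E1, F1⟩ :=
        IH (i+1) (res.set i v) (tab.set (i*p) 0) (by omega) (by omega) hres' htab'
      refine ⟨L1, L2, ?_, ?_, ?_, ?_, ?_⟩
      · intro j hji
        rw [B1 j (by omega)]
        exact getD_set_ne res v (by omega)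
      · intro j hij hjp
        by_cases hji : j = i
        · subst hji
          rw [B1 j (by omega), getD_set_self res j v (by omega)]
        · have hjj : j ≤ j*p := Nat.le_mul_of_pos_right j (by omega)
          rw [C1 j (by omega) hjp,
            getD_set_ne res v (show i ≠ j by omega),
            getD_set_ne res v (show i ≠ j*p by omega)]
      · intro j hij hjp
        have hne : j ≠ i := by
          rintro rfl; omega
        rw [D1 j (by omega) hjp]
        exact getD_set_ne res v (by omega)
      · rintro j ⟨m, him, hmp, rfl⟩
        by_cases hmi : m = i
        · subst hmi
          rw [F1 (m*p) ?_]
          · exact getD_set_self tab (m*p) 0 (by rw [htab]; exact hmp)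
          · rintro ⟨m', hm', hm'p, heq⟩
            have : m' = m := Nat.eq_of_mul_eq_mul_right (by omega) heq.symm
            omega
        · exact E1 (m*p) ⟨m, by omega, hmp, rfl⟩
      · intro j hj
        rw [F1 j ?_]
        · exact getD_set_ne tab 0 fun heq => hj ⟨i, le_refl i, hc, heq.symm⟩
        · rintro ⟨m, hm, hmp, heq⟩
          exact hj ⟨m, by omega, hmp, heq⟩
    · rw [if_neg hc]
      refine ⟨hres, htab, fun j _ => rfl, fun j hij hjp => ?_, fun j _ _ => rfl,
        fun j hex => ?_, fun j _ => rfl⟩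
      · exfalso
        have : i*p ≤ j*p := Nat.mul_le_mul_right p hij
        omega
      · exfalso
        obtain ⟨m, him, hmp, _⟩ := hex
        have : i*p ≤ m*p := Nat.mul_le_mul_right p him
        omega

-- downward-induction uniqueness of the zeta-pass recursion
lemma uniq_rec {p n : Nat} (hp : 2 ≤ p) (g T s : Nat → Rm)
    (hg0 : ∀ j, n ≤ j → g j = 0) (hT0 : ∀ j, n ≤ j → T j = 0)
    (hg : ∀ j, 1 ≤ j → g j = s j + g (j*p)) (hT : ∀ j, 1 ≤ j → T j = s j + T (j*p)) :
    ∀ j, 1 ≤ j → g j = T j := by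
  suffices H : ∀ k j, 1 ≤ j → n ≤ j + k → g j = T j by
    intro j hj; exact H n j hj (by omega)
  intro k
  induction k with
  | zero => intro j hj hn; rw [hg0 j (by omega), hT0 j (by omega)]
  | succ k IH =>
    intro j hj hn
    by_cases hjn : n ≤ j
    · rw [hg0 j hjn, hT0 j hjn]
    · have h2 : j*2 ≤ j*p := Nat.mul_le_mul (le_refl j) hp
      rw [hg j hj, hT j hj, IH (j*p) (by omega) (by omega)]

-- ===== loop invariants of the two transforms =====

def ZInv (f0 : Nat → Rm) (n B : Nat) (st : List Int × List Int) : Prop :=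
  st.1.length = n ∧ st.2.length = n
  ∧ (∀ j, 1 ≤ j → lft st.1 j = SSf B n f0 j)
  ∧ (∀ j, 1 ≤ j → j < n → (st.2.getD j 0 = 0 ↔ ∃ r, r.Prime ∧ r < B ∧ r ∣ j))

def MInv (c : Nat → Rm) (n B : Nat) (st : List Int × List Int) : Prop :=
  st.1.length = n ∧ st.2.length = n
  ∧ (∀ j, 1 ≤ j → lft st.1 j = RSf B n c j)
  ∧ (∀ j, 1 ≤ j → j < n → (st.2.getD j 0 = 0 ↔ ∃ r, r.Prime ∧ r < B ∧ r ∣ j))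

lemma exists_small_prime_factor {p : Nat} (hp : ¬ p.Prime) (h2 : 2 ≤ p) :
    ∃ r, r.Prime ∧ r < p ∧ r ∣ p := by
  refine ⟨p.minFac, Nat.minFac_prime (by omega), ?_, Nat.minFac_dvd p⟩
  rcases Nat.lt_or_ge p.minFac p with h | h
  · exact h
  · exact absurd (Nat.prime_def_minFac.mpr
      ⟨h2, le_antisymm (Nat.le_of_dvd (by omega) (Nat.minFac_dvd p)) h⟩) hp

lemma zStep_inv {f0 : Nat → Rm} {n B : Nat} (hB2 : 2 ≤ B) (hBn : B < n)
    {st : List Int × List Int} (h : ZInv f0 n B st) : ZInv f0 n (B+1) (zStep n st B) := by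
  obtain ⟨s1, s2⟩ := st
  obtain ⟨hL1, hL2, hres, htab⟩ := h
  simp only at hL1 hL2 hres htab
  by_cases hBp : B.Prime
  · have hnz : ¬ s2.getD B 0 = 0 := by
      rw [htab B (by omega) hBn]
      rintro ⟨r, hr, hrB, hrd⟩
      rcases Nat.Prime.eq_one_or_self_of_dvd hBp r hrd with h1 | h1
      · exact absurd (h1 ▸ hr) Nat.not_prime_one
      · omega
    unfold zStep
    rw [if_neg hnz]
    have hglen : (zInner B (s1, s2) ((n-1)/B)).1.length = n := by
      rw [(zInner_len B ((n-1)/B) (s1, s2)).1]; exact hL1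
    have hrec : ∀ j, 1 ≤ j → lft (zInner B (s1, s2) ((n-1)/B)).1 j
        = SSf B n f0 j + lft (zInner B (s1, s2) ((n-1)/B)).1 (j*B) := by
      intro j hj
      rw [zInner_res B hB2 ((n-1)/B) s1 s2 j hj]
      by_cases hjm : j ≤ (n-1)/B
      · rw [if_pos hjm, hres j hj]
      · rw [if_neg hjm, hres j hj]
        have hge : n ≤ j*B := by
          have := (Nat.div_lt_iff_lt_mul (show 0 < B by omega)).mp
            (show (n-1)/B < j by omega)
          omega
        rw [lft_out (show (zInner B (s1, s2) ((n-1)/B)).1.length ≤ j*B by omega)]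
    have hzero : ∀ j, n ≤ j → lft (zInner B (s1, s2) ((n-1)/B)).1 j = 0 :=
      fun j hj => lft_out (by omega)
    have hmain := uniq_rec hB2 _ (SSf (B+1) n f0) (SSf B n f0) hzero
      (fun j hj => SSf_vanish f0 hj) hrec (fun j hj => SSf_succ_prime hBp hj f0)
    obtain ⟨Ta, Tb⟩ := zInner_tab B (by omega) ((n-1)/B) s1 s2
      (by rw [hL2]; have := Nat.div_mul_le_self (n-1) B; omega)
    refine ⟨hglen, by rw [(zInner_len B ((n-1)/B) (s1, s2)).2]; exact hL2, hmain, ?_⟩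
    intro j hj hjn
    constructor
    · intro h0
      by_cases hex : ∃ i, 1 ≤ i ∧ i ≤ (n-1)/B ∧ j = i*B
      · obtain ⟨i, _, _, rfl⟩ := hex
        exact ⟨B, hBp, by omega, dvd_mul_left B i⟩
      · rw [Tb j hex] at h0
        obtain ⟨r, hr1, hr2, hr3⟩ := (htab j hj hjn).mp h0
        exact ⟨r, hr1, by omega, hr3⟩
    · rintro ⟨r, hr1, hr2, hr3⟩
      by_cases hrB : r = B
      · subst hrB
        apply Ta j
        refine ⟨j/r, Nat.div_pos (Nat.le_of_dvd (by omega) hr3) (by omega), ?_,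
          (Nat.div_mul_cancel hr3).symm⟩
        exact Nat.div_le_div_right (by omega)
      · by_cases hex : ∃ i, 1 ≤ i ∧ i ≤ (n-1)/B ∧ j = i*B
        · exact Ta j hex
        · rw [Tb j hex]
          exact (htab j hj hjn).mpr ⟨r, hr1, by omega, hr3⟩
  · have hz : s2.getD B 0 = 0 := by
      obtain ⟨r, hr, hrB, hrd⟩ := exists_small_prime_factor hBp hB2
      exact (htab B (by omega) hBn).mpr ⟨r, hr, hrB, hrd⟩
    unfold zStep
    rw [if_pos hz]
    refine ⟨hL1, hL2, fun j hj => ?_, fun j hj hjn => ?_⟩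
    · rw [hres j hj, SSf_succ_not_prime hBp]
    · rw [htab j hj hjn]
      constructor
      · rintro ⟨r, h1, h2, h3⟩; exact ⟨r, h1, by omega, h3⟩
      · rintro ⟨r, h1, h2, h3⟩
        refine ⟨r, h1, ?_, h3⟩
        have : r ≠ B := fun he => hBp (he ▸ h1)
        omega

lemma mStep_inv {c : Nat → Rm} {n B : Nat} (hB2 : 2 ≤ B) (hBn : B < n)
    {st : List Int × List Int} (h : MInv c n B st) : MInv c n (B+1) (mStep n st B) := by
  obtain ⟨s1, s2⟩ := st
  obtain ⟨hL1, hL2, hres, htab⟩ := h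
  simp only at hL1 hL2 hres htab
  by_cases hBp : B.Prime
  · have hnz : ¬ s2.getD B 0 = 0 := by
      rw [htab B (by omega) hBn]
      rintro ⟨r, hr, hrB, hrd⟩
      rcases Nat.Prime.eq_one_or_self_of_dvd hBp r hrd with h1 | h1
      · exact absurd (h1 ▸ hr) Nat.not_prime_one
      · omega
    unfold mStep
    rw [if_neg hnz]
    obtain ⟨L1, L2, B1, C1, D1, E1, F1⟩ :=
      mInner_spec B n hB2 n 1 s1 s2 (le_refl 1) (by omega) hL1 hL2
    refine ⟨L1, L2, ?_, ?_⟩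
    · intro j hj
      have key : lft (mInner B n (s1, s2) 1 n).1 j = lft s1 j - lft s1 (j*B) := by
        by_cases hjn : j < n
        · by_cases hjp : j*B < n
          · unfold lft
            rw [C1 j hj hjp, cast_pymod]
            push_cast
            ring
          · unfold lft
            rw [D1 j hj (by omega), getD_out (show s1.length ≤ j*B by omega)]
            push_cast
            ring
        · have h1 : lft (mInner B n (s1, s2) 1 n).1 j = 0 := lft_out (by omega)
          have h2 : lft s1 j = 0 := lft_out (by omega)
          have h3 : lft s1 (j*B) = 0 := lft_out (by
            have := Nat.le_mul_of_pos_right j (show 0 < B by omega)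
            omega)
          rw [h1, h2, h3]
          ring
      have hjB : 1 ≤ j*B := Nat.mul_pos (by omega) (by omega)
      rw [key, hres j hj, hres (j*B) hjB, RSf_succ_prime hBp hj c]
      ring
    · intro j hj hjn
      constructor
      · intro h0
        by_cases hex : ∃ m, 1 ≤ m ∧ m*B < n ∧ j = m*B
        · obtain ⟨i, _, _, rfl⟩ := hex
          exact ⟨B, hBp, by omega, dvd_mul_left B i⟩
        · rw [F1 j hex] at h0
          obtain ⟨r, h1, h2, h3⟩ := (htab j hj hjn).mp h0
          exact ⟨r, h1, by omega, h3⟩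
      · rintro ⟨r, h1, h2, h3⟩
        by_cases hrB : r = B
        · subst hrB
          apply E1 j
          refine ⟨j/r, Nat.div_pos (Nat.le_of_dvd (by omega) h3) (by omega), ?_,
            (Nat.div_mul_cancel h3).symm⟩
          rw [Nat.div_mul_cancel h3]
          exact hjn
        · by_cases hex : ∃ m, 1 ≤ m ∧ m*B < n ∧ j = m*B
          · exact E1 j hex
          · rw [F1 j hex]
            exact (htab j hj hjn).mpr ⟨r, h1, by omega, h3⟩
  · have hz : s2.getD B 0 = 0 := by
      obtain ⟨r, hr, hrB, hrd⟩ := exists_small_prime_factor hBp hB2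
      exact (htab B (by omega) hBn).mpr ⟨r, hr, hrB, hrd⟩
    unfold mStep
    rw [if_pos hz]
    refine ⟨hL1, hL2, fun j hj => ?_, fun j hj hjn => ?_⟩
    · rw [hres j hj, RSf_succ_not_prime hBp]
    · rw [htab j hj hjn]
      constructor
      · rintro ⟨r, h1, h2, h3⟩; exact ⟨r, h1, by omega, h3⟩
      · rintro ⟨r, h1, h2, h3⟩
        refine ⟨r, h1, ?_, h3⟩
        have : r ≠ B := fun he => hBp (he ▸ h1)
        omega

lemma zfold (f0 : Nat → Rm) (n : Nat) : ∀ (k : Nat) (st0 : List Int × List Int),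
    2 + k ≤ n → ZInv f0 n 2 st0 →
    ZInv f0 n (2+k) (List.foldl (zStep n) st0 (List.range' 2 k)) := by
  intro k
  induction k with
  | zero => intro st0 _ h; simpa using h
  | succ k IH =>
    intro st0 hk h
    rw [List.range'_concat, List.foldl_append]
    simp only [one_mul, List.foldl_cons, List.foldl_nil]
    have := zStep_inv (show 2 ≤ 2+k by omega) (show 2+k < n by omega) (IH st0 (by omega) h)
    exact this

lemma mfold (c : Nat → Rm) (n : Nat) : ∀ (k : Nat) (st0 : List Int × List Int),
    2 + k ≤ n → MInv c n 2 st0 →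
    MInv c n (2+k) (List.foldl (mStep n) st0 (List.range' 2 k)) := by
  intro k
  induction k with
  | zero => intro st0 _ h; simpa using h
  | succ k IH =>
    intro st0 hk h
    rw [List.range'_concat, List.foldl_append]
    simp only [one_mul, List.foldl_cons, List.foldl_nil]
    have := mStep_inv (show 2 ≤ 2+k by omega) (show 2+k < n by omega) (IH st0 (by omega) h)
    exact this

lemma mzt_char (l : List Int) :
    (mzt l).length = l.length ∧ ∀ j, 1 ≤ j → lft (mzt l) j = DSf l.length (lft l) j := by
  simp only [mzt]
  rcases Nat.lt_or_ge l.length 2 with hn | hn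
  · rw [show l.length - 2 = 0 from by omega]
    simp only [List.range'_zero, List.foldl_nil]
    refine ⟨trivial, fun j hj => ?_⟩
    show lft l j = DSf l.length (lft l) j
    rw [lft_out (by omega), DSf_vanish _ (by omega)]
  · have hinit : ZInv (lft l) l.length 2 (l, List.replicate l.length 1) := by
      refine ⟨rfl, List.length_replicate, fun j hj => ?_, fun j hj hjn => ?_⟩
      · rw [SSf_base hj]
        by_cases hjn : j < l.length
        · rw [if_pos hjn]
        · rw [if_neg hjn, lft_out (by show l.length ≤ j; omega)]
      · rw [List.getD_replicate 1 hjn]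
        constructor
        · intro h; exact absurd h one_ne_zero
        · rintro ⟨r, hr, hr2, _⟩
          have := hr.two_le
          omega
    have hfold := zfold (lft l) l.length (l.length - 2) (l, List.replicate l.length 1)
      (by omega) hinit
    rw [show 2 + (l.length - 2) = l.length from by omega] at hfold
    obtain ⟨hL1, _, hres, _⟩ := hfold
    exact ⟨hL1, fun j hj => by rw [hres j hj, SSf_top (le_refl _) hj]⟩

lemma mmt_char (l : List Int) (c : Nat → Rm) (hc : ∀ j, 1 ≤ j → lft l j = DSf l.length c j) :
    (mmt l).length = l.length
    ∧ (∀ j, 1 ≤ j → lft (mmt l) j = if j < l.length then c j else 0) := by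
  simp only [mmt]
  rcases Nat.lt_or_ge l.length 2 with hn | hn
  · rw [show l.length - 2 = 0 from by omega]
    simp only [List.range'_zero, List.foldl_nil]
    refine ⟨trivial, fun j hj => ?_⟩
    show lft l j = if j < l.length then c j else 0
    rw [lft_out (by omega), if_neg (by omega)]
  · have hinit : MInv c l.length 2 (l, List.replicate l.length 1) := by
      refine ⟨rfl, List.length_replicate, fun j hj => ?_, fun j hj hjn => ?_⟩
      · rw [RSf_base, ← hc j hj]
      · rw [List.getD_replicate 1 hjn]
        constructor
        · intro h; exact absurd h one_ne_zero
        · rintro ⟨r, hr, hr2, _⟩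
          have := hr.two_le
          omega
    have hfold := mfold c l.length (l.length - 2) (l, List.replicate l.length 1)
      (by omega) hinit
    rw [show 2 + (l.length - 2) = l.length from by omega] at hfold
    obtain ⟨hL1, _, hres, _⟩ := hfold
    exact ⟨hL1, fun j hj => by rw [hres j hj, RSf_top (le_refl _) hj]⟩

-- range preservation of the Moebius transform (entries stay in [0, 998244353))
def InRange (l : List Int) : Prop := ∀ j, 0 ≤ l.getD j 0 ∧ l.getD j 0 < 998244353

lemma mmt_range (l : List Int) (h : InRange l) : InRange (mmt l) := by
  simp only [mmt]
  have hstep : ∀ (st : List Int × List Int) (p : Nat), 2 ≤ p →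
      st.1.length = l.length ∧ st.2.length = l.length ∧ InRange st.1 →
      (mStep l.length st p).1.length = l.length ∧ (mStep l.length st p).2.length = l.length
        ∧ InRange (mStep l.length st p).1 := by
    rintro ⟨s1, s2⟩ p hp ⟨h1, h2, h3⟩
    simp only at h1 h2 h3
    unfold mStep
    split_ifs with hz
    · exact ⟨h1, h2, h3⟩
    · obtain ⟨L1, L2, B1, C1, D1, _, _⟩ :=
        mInner_spec p l.length hp l.length 1 s1 s2 (le_refl 1) (by omega) h1 h2
      refine ⟨L1, L2, fun j => ?_⟩
      rcases Nat.eq_zero_or_pos j with rfl | hj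
      · rw [B1 0 (by omega)]
        exact h3 0
      · by_cases hjp : j*p < l.length
        · rw [C1 j hj hjp]
          exact ⟨pymod_nonneg _, pymod_lt _⟩
        · rw [D1 j hj (by omega)]
          exact h3 j
  have hfold : ∀ (L : List Nat), (∀ x ∈ L, 2 ≤ x) →
      ∀ (st : List Int × List Int),
      st.1.length = l.length ∧ st.2.length = l.length ∧ InRange st.1 →
      (List.foldl (mStep l.length) st L).1.length = l.length
        ∧ (List.foldl (mStep l.length) st L).2.length = l.length
        ∧ InRange (List.foldl (mStep l.length) st L).1 := by
    intro L
    induction L with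
    | nil => intro _ st hst; simpa using hst
    | cons x xs IH =>
      intro hx st hst
      simp only [List.foldl_cons]
      exact IH (fun y hy => hx y (by simp [hy])) _ (hstep st x (hx x (by simp)) hst)
  exact (hfold (List.range' 2 (l.length-2)) (fun x hx => (List.mem_range'_1.mp hx).1)
    (l, List.replicate l.length 1) ⟨rfl, List.length_replicate, h⟩).2.2

-- ===== port B characterization =====

lemma mygcd_eq : ∀ y x, mygcd x y = Nat.gcd x y := by
  intro y
  induction y using Nat.strong_induction_on with
  | _ y IH =>
    intro x
    rw [mygcd]
    split
    · rename_i h; subst h; simp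
    · rename_i h
      rw [IH (x % y) (Nat.mod_lt x (Nat.pos_of_ne_zero h)), Nat.gcd_comm y (x % y),
        ← Nat.gcd_rec y x, Nat.gcd_comm y x]

def bres (a b : List Int) : List Int :=
  (List.range' 1 a.length).foldl (fun r i =>
      (List.range' 1 b.length).foldl (fun r j =>
          r.set (mygcd i j)
            (PySem.Int.mod (r.getD (mygcd i j) 0 + a.getD (i-1) 0 * b.getD (j-1) 0) MODA)) r)
    (List.replicate (min a.length b.length + 1) (0:Int))

lemma alt_eq_bres (a b : List Int) : gcd_convolve_alt a b = (bres a b).drop 1 := by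
  simp only [gcd_convolve_alt, bres]

lemma binner (a b : List Int) (i : Nat) (hi1 : 1 ≤ i) (hila : i ≤ a.length) :
    ∀ (m : Nat) (r : List Int), m ≤ b.length → r.length = min a.length b.length + 1 →
      ((List.range' 1 m).foldl (fun r j => r.set (mygcd i j)
          (PySem.Int.mod (r.getD (mygcd i j) 0 + a.getD (i-1) 0 * b.getD (j-1) 0) MODA)) r).length
        = min a.length b.length + 1
      ∧ ((∀ t, 0 ≤ r.getD t 0 ∧ r.getD t 0 < 998244353) →
          ∀ t, 0 ≤ ((List.range' 1 m).foldl (fun r j => r.set (mygcd i j)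
              (PySem.Int.mod (r.getD (mygcd i j) 0 + a.getD (i-1) 0 * b.getD (j-1) 0) MODA)) r).getD t 0
            ∧ ((List.range' 1 m).foldl (fun r j => r.set (mygcd i j)
              (PySem.Int.mod (r.getD (mygcd i j) 0 + a.getD (i-1) 0 * b.getD (j-1) 0) MODA)) r).getD t 0
              < 998244353)
      ∧ (∀ g, lft ((List.range' 1 m).foldl (fun r j => r.set (mygcd i j)
            (PySem.Int.mod (r.getD (mygcd i j) 0 + a.getD (i-1) 0 * b.getD (j-1) 0) MODA)) r) g
          = lft r g + ∑ j ∈ Finset.range m,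
              if Nat.gcd i (j+1) = g
              then ((a.getD (i-1) 0 : Int) : Rm) * ((b.getD j 0 : Int) : Rm) else 0) := by
  intro m
  induction m with
  | zero =>
    intro r hm hr
    simp only [List.range'_zero, List.foldl_nil]
    exact ⟨hr, fun h t => h t, fun g => by
      rw [Finset.range_zero, Finset.sum_empty, add_zero]⟩
  | succ m IH =>
    intro r hm hr
    rw [List.range'_concat]
    simp only [one_mul, List.foldl_append, List.foldl_cons, List.foldl_nil]
    obtain ⟨IH1, IH2, IH3⟩ := IH r (by omega) hr
    set F := (List.range' 1 m).foldl (fun r j => r.set (mygcd i j)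
      (PySem.Int.mod (r.getD (mygcd i j) 0 + a.getD (i-1) 0 * b.getD (j-1) 0) MODA)) r with hF
    have hg : mygcd i (1+m) = Nat.gcd i (m+1) := by rw [mygcd_eq, Nat.add_comm]
    have hgl : Nat.gcd i (m+1) < min a.length b.length + 1 := by
      have h1 : Nat.gcd i (m+1) ≤ i := Nat.gcd_le_left (m+1) hi1
      have h2 : Nat.gcd i (m+1) ≤ m+1 := Nat.gcd_le_right i (by omega)
      omega
    have hsub : 1 + m - 1 = m := by omega
    refine ⟨?_, ?_, ?_⟩
    · rw [List.length_set]
      exact IH1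
    · intro h0 t
      rw [hg, hsub]
      by_cases ht : Nat.gcd i (m+1) = t
      · rw [← ht, getD_set_self F _ _ (by omega)]
        exact ⟨pymod_nonneg _, pymod_lt _⟩
      · rw [getD_set_ne F _ ht]
        exact IH2 h0 t
    · intro g
      rw [Finset.sum_range_succ, hg, hsub]
      by_cases hgeq : Nat.gcd i (m+1) = g
      · rw [if_pos hgeq, ← hgeq]
        unfold lft
        rw [getD_set_self F _ _ (by omega), cast_pymod]
        push_cast
        have hI := IH3 (Nat.gcd i (m+1))
        unfold lft at hI
        rw [hI]
        ring
      · rw [if_neg hgeq]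
        unfold lft
        rw [getD_set_ne F _ hgeq]
        have hI := IH3 g
        unfold lft at hI
        rw [hI, add_zero]

lemma bouter (a b : List Int) :
    ∀ (k : Nat) (r : List Int), k ≤ a.length → r.length = min a.length b.length + 1 →
      ((List.range' 1 k).foldl (fun r i => (List.range' 1 b.length).foldl (fun r j =>
          r.set (mygcd i j)
            (PySem.Int.mod (r.getD (mygcd i j) 0 + a.getD (i-1) 0 * b.getD (j-1) 0) MODA)) r) r).length
        = min a.length b.length + 1
      ∧ ((∀ t, 0 ≤ r.getD t 0 ∧ r.getD t 0 < 998244353) →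
          ∀ t, 0 ≤ ((List.range' 1 k).foldl (fun r i => (List.range' 1 b.length).foldl (fun r j =>
              r.set (mygcd i j)
                (PySem.Int.mod (r.getD (mygcd i j) 0 + a.getD (i-1) 0 * b.getD (j-1) 0) MODA)) r) r).getD t 0
            ∧ ((List.range' 1 k).foldl (fun r i => (List.range' 1 b.length).foldl (fun r j =>
              r.set (mygcd i j)
                (PySem.Int.mod (r.getD (mygcd i j) 0 + a.getD (i-1) 0 * b.getD (j-1) 0) MODA)) r) r).getD t 0
              < 998244353)
      ∧ (∀ g, lft ((List.range' 1 k).foldl (fun r i => (List.range' 1 b.length).foldl (fun r j =>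
            r.set (mygcd i j)
              (PySem.Int.mod (r.getD (mygcd i j) 0 + a.getD (i-1) 0 * b.getD (j-1) 0) MODA)) r) r) g
          = lft r g + ∑ i ∈ Finset.range k, ∑ j ∈ Finset.range b.length,
              if Nat.gcd (i+1) (j+1) = g
              then ((a.getD i 0 : Int) : Rm) * ((b.getD j 0 : Int) : Rm) else 0) := by
  intro k
  induction k with
  | zero =>
    intro r hk hr
    simp only [List.range'_zero, List.foldl_nil]
    exact ⟨hr, fun h t => h t, fun g => by
      rw [Finset.range_zero, Finset.sum_empty, add_zero]⟩
  | succ k IH =>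
    intro r hk hr
    rw [List.range'_concat]
    simp only [one_mul, List.foldl_append, List.foldl_cons, List.foldl_nil]
    obtain ⟨IH1, IH2, IH3⟩ := IH r (by omega) hr
    set F := (List.range' 1 k).foldl (fun r i => (List.range' 1 b.length).foldl (fun r j =>
      r.set (mygcd i j)
        (PySem.Int.mod (r.getD (mygcd i j) 0 + a.getD (i-1) 0 * b.getD (j-1) 0) MODA)) r) r with hF
    obtain ⟨J1, J2, J3⟩ := binner a b (1+k) (by omega) (by omega) b.length F (le_refl _) IH1
    have hsub : 1 + k - 1 = k := by omega
    refine ⟨J1, fun h0 t => J2 (IH2 h0) t, fun g => ?_⟩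
    have hinner : (∑ j ∈ Finset.range b.length,
          if Nat.gcd (1+k) (j+1) = g
          then ((a.getD (1+k-1) 0 : Int) : Rm) * ((b.getD j 0 : Int) : Rm) else 0)
        = ∑ j ∈ Finset.range b.length,
          if Nat.gcd (k+1) (j+1) = g
          then ((a.getD k 0 : Int) : Rm) * ((b.getD j 0 : Int) : Rm) else 0 := by
      rw [hsub, Nat.add_comm 1 k]
    rw [J3 g, IH3 g, hinner, Finset.sum_range_succ, add_assoc]

lemma replicate_getD (N : Nat) (t : Nat) : (List.replicate N (0:Int)).getD t 0 = 0 := by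
  rcases Nat.lt_or_ge t N with h | h
  · rw [List.getD_replicate _ h]
  · rw [getD_out (by rw [List.length_replicate]; omega)]

lemma bres_len (a b : List Int) : (bres a b).length = min a.length b.length + 1 := by
  exact (bouter a b a.length _ (le_refl _) (by rw [List.length_replicate])).1

lemma bres_range (a b : List Int) : InRange (bres a b) := by
  exact (bouter a b a.length _ (le_refl _) (by rw [List.length_replicate])).2.1
    (fun t => by rw [replicate_getD]; norm_num)

lemma bres_cast (a b : List Int) : ∀ g, lft (bres a b) g
    = ∑ i ∈ Finset.range a.length, ∑ j ∈ Finset.range b.length,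
        if Nat.gcd (i+1) (j+1) = g then ((a.getD i 0 : Int) : Rm) * ((b.getD j 0 : Int) : Rm) else 0 := by
  intro g
  show lft (bres a b) g = _
  rw [bres, (bouter a b a.length _ (le_refl _) (by rw [List.length_replicate])).2.2 g]
  have hz : lft (List.replicate (min a.length b.length + 1) (0:Int)) g = 0 := by
    unfold lft
    rw [replicate_getD]
    simp
  rw [hz, zero_add]

lemma gcdc_shift (a b : List Int) (g : Nat) (hg : 1 ≤ g) :
    gcdc a b g = ∑ i ∈ Finset.range a.length, ∑ j ∈ Finset.range b.length,
        if Nat.gcd (i+1) (j+1) = g then ((a.getD i 0 : Int) : Rm) * ((b.getD j 0 : Int) : Rm) else 0 := by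
  unfold gcdc
  rw [Finset.sum_range_succ']
  have hF0 : (∑ j ∈ Finset.range (b.length+1),
      if Nat.gcd 0 j = g then lft (0 :: a) 0 * lft (0 :: b) j else 0) = 0 := by
    refine Finset.sum_eq_zero fun j _ => ?_
    split_ifs
    · simp [lft]
    · rfl
  rw [hF0, add_zero]
  refine Finset.sum_congr rfl fun i _ => ?_
  rw [Finset.sum_range_succ']
  have h0 : (if Nat.gcd (i+1) 0 = g then lft (0 :: a) (i+1) * lft (0 :: b) 0 else 0) = 0 := by
    split_ifs
    · simp [lft]
    · rfl
  rw [h0, add_zero]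
  refine Finset.sum_congr rfl fun j _ => ?_
  refine if_congr Iff.rfl ?_ rfl
  simp [lft]


-- ===== VERDICT (by name: the statement is the Claim_ definition above) =====
theorem gcd_convolve_spec : Claim_equal_gcd_convolve := by
  intro a b _
  show gcd_convolve a b = gcd_convolve_alt a b
  rw [alt_eq_bres]
  simp only [gcd_convolve]
  set A' := mzt ((0:Int) :: a) with hA'
  set B' := mzt ((0:Int) :: b) with hB'
  set res := (A'.zip B').map (fun v => PySem.Int.mod (v.1 * v.2) MODA) with hresdef
  have hAlen : A'.length = a.length + 1 := by rw [hA', (mzt_char _).1, List.length_cons]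
  have hBlen : B'.length = b.length + 1 := by rw [hB', (mzt_char _).1, List.length_cons]
  have hreslen : res.length = min (a.length+1) (b.length+1) := by
    rw [hresdef, List.length_map, List.length_zip, hAlen, hBlen]
  have hresget : ∀ k, k < res.length →
      res.getD k 0 = PySem.Int.mod (A'.getD k 0 * B'.getD k 0) MODA := by
    intro k hk
    have hk1 : k < A'.length := by rw [hAlen]; rw [hreslen] at hk; omega
    have hk2 : k < B'.length := by rw [hBlen]; rw [hreslen] at hk; omega
    rw [hresdef] at hk ⊢
    rw [List.getD_eq_getElem _ _ hk, List.getElem_map, List.getElem_zip,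
      List.getD_eq_getElem _ 0 hk1, List.getD_eq_getElem _ 0 hk2]
  have hrescast : ∀ k, 1 ≤ k → lft res k = DSf res.length (gcdc a b) k := by
    intro k hk
    by_cases hkn : k < res.length
    · have hmul : lft res k = lft A' k * lft B' k := by
        unfold lft
        rw [hresget k hkn, cast_pymod]
        push_cast
        rfl
      have ha := (mzt_char ((0:Int) :: a)).2 k hk
      have hb := (mzt_char ((0:Int) :: b)).2 k hk
      rw [← hA'] at ha
      rw [← hB'] at hb
      simp only [List.length_cons] at ha hb
      rw [hmul, ha, hb, prod_DS a b k hk, ← hreslen]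
    · rw [lft_out (by omega), DSf_vanish _ (by omega)]
  obtain ⟨hmlen, hmcast⟩ := mmt_char res (gcdc a b) hrescast
  have hresrange : InRange res := by
    intro k
    by_cases hk : k < res.length
    · rw [hresget k hk]
      exact ⟨pymod_nonneg _, pymod_lt _⟩
    · rw [getD_out (by omega)]
      exact ⟨le_refl 0, by norm_num⟩
  have hmrange := mmt_range res hresrange
  have hblen := bres_len a b
  have hbrange := bres_range a b
  apply List.ext_getElem
  · rw [List.length_drop, List.length_drop, hmlen, hreslen, hblen]
    omega
  · intro t h1 h2
    rw [List.getElem_drop, List.getElem_drop]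
    have ht1 : 1 + t < (mmt res).length := by
      rw [List.length_drop] at h1
      omega
    have ht2 : 1 + t < (bres a b).length := by
      rw [List.length_drop] at h2
      omega
    rw [← List.getD_eq_getElem _ 0 ht1, ← List.getD_eq_getElem _ 0 ht2]
    refine int_eq_of_cast (hmrange (1+t)).1 (hmrange (1+t)).2
      (hbrange (1+t)).1 (hbrange (1+t)).2 ?_
    show lft (mmt res) (1+t) = lft (bres a b) (1+t)
    rw [hmcast (1+t) (by omega), bres_cast a b (1+t),
      if_pos (show 1+t < res.length from by rw [hmlen] at ht1; exact ht1)]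
    exact gcdc_shift a b (1+t) (by omega)
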